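-- pv_equiv track=rewrite | github.com/Gyusik-Choi/algorithm | programmers/외톨이 알파벳/외톨이 알파벳_2.py | solution
-- ===== SOURCE A (Python) =====
-- def solution(input_string):
--     arr = []
--     for char in input_string:
--         if len(arr) and arr[-1] == char:
--             continue
--         arr.append(char)
--
--     alpha = ''.join(sorted(set(list(filter(lambda x: arr.count(x) > 1, arr)))))
--     return alpha if alpha else 'N'
-- ===== SOURCE B (Python) =====
-- def solution(input_string):
--     alpha = ''.join(c for c in sorted(set(input_string))
--                     if c * input_string.count(c) not in input_string)
--     return alpha or 'N'
-- ===== Notes on version B (the rewrite author's own statement) =====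
-- stated objective: faster
-- what changed: A collapses consecutive duplicates into a list and then filters it with a quadratic count pass; B never builds runs or counts them at all -- for each distinct character c it tests whether all occurrences of c form one contiguous block, by checking whether the string contains a substring of count-of-c consecutive copies of c, and collects the sorted characters that fail the test.
import Mathlib
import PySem

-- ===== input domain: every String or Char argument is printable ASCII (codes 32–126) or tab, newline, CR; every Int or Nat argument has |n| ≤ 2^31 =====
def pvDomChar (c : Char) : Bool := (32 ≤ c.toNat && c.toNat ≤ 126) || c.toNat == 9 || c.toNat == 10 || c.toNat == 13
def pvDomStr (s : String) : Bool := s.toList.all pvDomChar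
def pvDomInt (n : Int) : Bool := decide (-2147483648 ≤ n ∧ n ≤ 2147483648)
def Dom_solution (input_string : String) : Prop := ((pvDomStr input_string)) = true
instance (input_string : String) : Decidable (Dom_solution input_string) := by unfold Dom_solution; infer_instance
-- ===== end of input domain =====

-- B replaces A's collapse-into-runs-then-count strategy by a per-character contiguity test:
-- a character c is in the answer iff c * s.count(c) is NOT a substring of s (objective: alternative).

-- ===== PORT A =====
def solution (input_string : String) : String :=
  let arr := input_string.toList.foldl
    (fun arr char =>
      if arr.length ≠ 0 ∧ PySem.List.pyGet? arr (-1) = some char then arr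
      else arr ++ [char]) []
  let alpha := String.ofList (PySem.List.sorted
    (PySem.Set.ofList (arr.filter (fun x => decide (arr.count x > 1)))) (fun x => x) false)
  if alpha = "" then "N" else alpha

-- ===== PORT B =====
def solution_alt (input_string : String) : String :=
  let l := input_string.toList
  let alpha := String.ofList
    ((PySem.List.sorted (PySem.Set.ofList l) (fun x => x) false).filter
      (fun c => !PySem.Chars.isIn (List.replicate (PySem.Chars.count l [c]) c) l))
  if alpha = "" then "N" else alpha

-- ===== PRECONDITION & SPEC =====
def Spec_solution (input_string : String) (out : String) : Prop := out = solution_alt input_string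
instance (input_string : String) (out : String) : Decidable (Spec_solution input_string out) := by unfold Spec_solution; infer_instance

-- ===== CLAIM (what is proved, stated in full; the proofs are below) =====
def Claim_equal_solution : Prop := ∀ (input_string : String), Dom_solution input_string → Spec_solution input_string (solution input_string)

-- ===== LEMMAS AND PROOFS =====

-- A's collapsed list, written as a structural recursion on the input with the previous char as state
def pvChunks : Option Char → List Char → List Char
  | _, [] => []
  | p, a :: t => if p = some a then pvChunks p t else a :: pvChunks (some a) t

-- number of runs of c, with a flag saying whether the previous char was c
def pvRuns (c : Char) : Bool → List Char → Nat
  | _, [] => 0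
  | b, a :: t => if a = c then (if b then pvRuns c true t else pvRuns c true t + 1) else pvRuns c false t

-- Python arr[-1] is the last element
lemma pvGet_neg_one (xs : List Char) : PySem.List.pyGet? xs (-1) = xs.getLast? := by
  rcases xs.eq_nil_or_concat with h | ⟨ys, c, h⟩ <;> subst h
  · simp [PySem.List.pyGet?, PySem.List.pyIdx?]
  · simp [PySem.List.pyGet?, PySem.List.pyIdx?]

-- A's foldl collapse loop computes pvChunks of the accumulator's last element
lemma pvFold (l : List Char) : ∀ (arr : List Char),
    l.foldl (fun arr char =>
      if arr.length ≠ 0 ∧ PySem.List.pyGet? arr (-1) = some char then arr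
      else arr ++ [char]) arr
    = arr ++ pvChunks arr.getLast? l := by
  induction l with
  | nil => intro arr; simp [pvChunks]
  | cons ch t ih =>
    intro arr
    rw [List.foldl_cons]
    by_cases h : arr.getLast? = some ch
    · have hne : arr ≠ [] := by rintro rfl; simp at h
      have hstep : (if arr.length ≠ 0 ∧ PySem.List.pyGet? arr (-1) = some ch then arr
          else arr ++ [ch]) = arr :=
        if_pos ⟨by simpa using hne, by rw [pvGet_neg_one]; exact h⟩
      rw [hstep, ih arr]
      simp [pvChunks, h]
    · have hstep : (if arr.length ≠ 0 ∧ PySem.List.pyGet? arr (-1) = some ch then arr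
          else arr ++ [ch]) = arr ++ [ch] :=
        if_neg (by rw [pvGet_neg_one]; tauto)
      rw [hstep, ih (arr ++ [ch])]
      simp [pvChunks, h]

-- counting c in the collapsed list = counting runs of c
lemma pvCount_chunks (c : Char) (l : List Char) : ∀ (p : Option Char),
    (pvChunks p l).count c = pvRuns c (p == some c) l := by
  induction l with
  | nil => intro p; simp [pvChunks, pvRuns]
  | cons a t ih =>
    intro p
    by_cases hac : a = c
    · subst hac
      by_cases hp : p = some a
      · subst hp
        simp [pvChunks, pvRuns, ih]
      · have hb : (p == some a) = false := by simpa using hp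
        simp [pvChunks, pvRuns, hp, hb, ih]
    · have hb : (a == c) = false := by simp [hac]
      by_cases hp : p = some a
      · subst hp
        simp [pvChunks, pvRuns, hac, hb, ih]
      · simp [pvChunks, pvRuns, hp, hac, hb, ih]

lemma pvRuns_zero_of_not_mem (c : Char) (l : List Char) (b : Bool) (h : c ∉ l) :
    pvRuns c b l = 0 := by
  induction l generalizing b with
  | nil => simp [pvRuns]
  | cons a t ih =>
    have hac : ¬a = c := by rintro rfl; exact h (List.mem_cons_self)
    simp only [List.mem_cons, not_or] at h
    simp [pvRuns, hac, ih _ h.2]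

lemma pvRuns_mem (c : Char) (l : List Char) : c ∈ l ↔ 1 ≤ pvRuns c false l := by
  induction l with
  | nil => simp [pvRuns]
  | cons a t ih =>
    by_cases hac : a = c
    · subst hac; simp [pvRuns]
  -- a ≠ c
    · simp [pvRuns, hac, ih, List.mem_cons, Ne.symm hac]

lemma pvRuns_append_not_mem (c : Char) (x z : List Char) (h : c ∉ x) :
    pvRuns c false (x ++ z) = pvRuns c false z := by
  induction x with
  | nil => simp
  | cons a t ih =>
    have hac : ¬a = c := by rintro rfl; exact h (List.mem_cons_self)
    simp only [List.mem_cons, not_or] at h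
    simp [pvRuns, hac, ih h.2]

lemma pvRuns_replicate_true (c : Char) (n : Nat) (y : List Char) :
    pvRuns c true (List.replicate n c ++ y) = pvRuns c true y := by
  induction n with
  | zero => simp
  | succ m ih => simp [List.replicate_succ, pvRuns, ih]

-- occurrences contiguous ⇒ at most one run
lemma pvInfix_runs_le (c : Char) (l : List Char)
    (h : List.replicate (l.count c) c <:+: l) : pvRuns c false l ≤ 1 := by
  obtain ⟨x, y, hxy⟩ := h
  have hcnt : l.count c = x.count c + (l.count c + y.count c) := by
    conv_lhs => rw [← hxy]
    simp [List.count_append]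
  have hx : c ∉ x := by
    rw [← List.count_eq_zero (a := c)]; omega
  have hy : c ∉ y := by
    rw [← List.count_eq_zero (a := c)]; omega
  rw [← hxy, List.append_assoc, pvRuns_append_not_mem c x _ hx]
  cases hn : l.count c with
  | zero =>
    simp only [List.replicate_zero, List.nil_append]
    simp [pvRuns_zero_of_not_mem c y false hy]
  | succ m =>
    simp [List.replicate_succ, pvRuns, pvRuns_replicate_true,
      pvRuns_zero_of_not_mem c y true hy]

lemma pvRuns_true_zero_shape (c : Char) (t : List Char) (h : pvRuns c true t = 0) :
    ∃ m b, t = List.replicate m c ++ b ∧ c ∉ b := by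
  induction t with
  | nil => exact ⟨0, [], by simp⟩
  | cons d t' ih =>
    by_cases hdc : d = c
    · subst hdc
      simp only [pvRuns] at h
      obtain ⟨m, b, hb, hcb⟩ := ih h
      exact ⟨m + 1, b, by simp [List.replicate_succ, hb], hcb⟩
    · have h' : pvRuns c false t' = 0 := by simpa [pvRuns, hdc] using h
      have hct' : c ∉ t' := by
        intro hmem; have := (pvRuns_mem c t').mp hmem; omega
      refine ⟨0, d :: t', by simp, ?_⟩
      simp [List.mem_cons, Ne.symm hdc, hct']

-- at most one run ⇒ occurrences contiguous
lemma pvRuns_le_infix (c : Char) (l : List Char) (h : pvRuns c false l ≤ 1) :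
    List.replicate (l.count c) c <:+: l := by
  induction l with
  | nil => simp
  | cons a t ih =>
    by_cases hac : a = c
    · subst hac
      have h0 : pvRuns a true t = 0 := by
        simp [pvRuns] at h; omega
      obtain ⟨m, b, hb, hcb⟩ := pvRuns_true_zero_shape a t h0
      have hcount : (a :: t).count a = m + 1 := by
        simp [hb, List.count_append, List.count_eq_zero.mpr hcb]
      rw [hcount, hb, show a :: (List.replicate m a ++ b) = List.replicate (m + 1) a ++ b by
        simp [List.replicate_succ]]
      exact (List.prefix_append _ _).isInfix
    · have h' : pvRuns c false t ≤ 1 := by simpa [pvRuns, hac] using h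
      have : (a :: t).count c = t.count c := by simp [hac]
      rw [this]
      exact (ih h').trans (List.infix_cons (List.infix_refl t))

-- Python s.count(c) for a single character counts occurrences of that character
lemma pvCountGo_single (c : Char) (l : List Char) : ∀ (fuel acc : Nat), l.length ≤ fuel →
    PySem.Chars.count.go [c] fuel l acc = acc + l.count c := by
  induction l with
  | nil => intro fuel acc _; cases fuel <;> simp [PySem.Chars.count.go]
  | cons h t ih =>
    intro fuel acc hf
    cases fuel with
    | zero => simp at hf
    | succ f =>
      have hf' : t.length ≤ f := by simpa using hf
      by_cases hch : c = h
      · subst hch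
        simp [PySem.Chars.count.go, List.isPrefixOf, ih f (acc + 1) hf']
        omega
      · have : ([c].isPrefixOf (h :: t)) = false := by
          simp [List.isPrefixOf]; exact fun hb => absurd (by simpa using hb) hch
        simp [PySem.Chars.count.go, this, ih f acc hf', Ne.symm hch]

lemma pvCount_single (c : Char) (l : List Char) : PySem.Chars.count l [c] = l.count c := by
  simp [PySem.Chars.count, pvCountGo_single c l l.length 0 le_rfl]

-- the central equivalence: c heads more than one run ⟺ its occurrences are not one block
lemma pvKey (c : Char) (l : List Char) :
    (2 ≤ pvRuns c false l) ↔ (c ∈ l ∧ ¬ List.replicate (l.count c) c <:+: l) := by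
  constructor
  · intro h2
    refine ⟨(pvRuns_mem c l).mpr (by omega), fun hinf => ?_⟩
    have := pvInfix_runs_le c l hinf; omega
  · rintro ⟨hmem, hninf⟩
    have h1 := (pvRuns_mem c l).mp hmem
    by_contra hlt
    exact hninf (pvRuns_le_infix c l (by omega))

-- the two candidate lists are equal: B's filtered sorted set is exactly sorted(A's set)
lemma pvLists (l : List Char) :
    PySem.List.sorted
      (PySem.Set.ofList ((pvChunks none l).filter (fun x => decide ((pvChunks none l).count x > 1))))
      (fun x => x) false
    = (PySem.List.sorted (PySem.Set.ofList l) (fun x => x) false).filter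
        (fun c => !PySem.Chars.isIn (List.replicate (PySem.Chars.count l [c]) c) l) := by
  apply PySem.List.sorted_eq_of_perm_of_pairwise_lt
  · have hpw := PySem.List.sorted_ofList_pairwise_lt (κ := Char) l
    have hnd1 : ((PySem.List.sorted (PySem.Set.ofList l) (fun x => x) false).filter
        (fun c => !PySem.Chars.isIn (List.replicate (PySem.Chars.count l [c]) c) l)).Nodup :=
      (hpw.imp (fun h => ne_of_lt h)).filter _
    rw [List.perm_ext_iff_of_nodup hnd1 (PySem.Set.nodup_ofList _)]
    intro c
    rw [PySem.Set.mem_ofList, List.mem_filter, List.mem_filter, PySem.List.mem_sorted,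
      PySem.Set.mem_ofList]
    have hkey := pvKey c l
    have hcc : (pvChunks none l).count c = pvRuns c false l := by
      simpa using pvCount_chunks c l none
    constructor
    · rintro ⟨hc, hb⟩
      have hbf : PySem.Chars.isIn (List.replicate (PySem.Chars.count l [c]) c) l = false := by
        simpa using hb
      rw [pvCount_single, PySem.Chars.isIn_eq_false_iff] at hbf
      have h2 := hkey.mpr ⟨hc, hbf⟩
      have hmemc : c ∈ pvChunks none l := List.count_pos_iff.mp (by omega)
      exact ⟨hmemc, by simp only [hcc]; simpa using h2⟩
    · rintro ⟨hc, hb⟩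
      have h2 : 2 ≤ pvRuns c false l := by rw [← hcc]; simpa using hb
      obtain ⟨hml, hninf⟩ := hkey.mp h2
      have hbf : PySem.Chars.isIn (List.replicate (PySem.Chars.count l [c]) c) l = false := by
        rw [pvCount_single, PySem.Chars.isIn_eq_false_iff]; exact hninf
      exact ⟨hml, by simp [hbf]⟩
  · exact (PySem.List.sorted_ofList_pairwise_lt (κ := Char) l).filter _

-- ===== VERDICT (by name: the statement is the Claim_ definition above) =====
theorem solution_spec : Claim_equal_solution := by
  intro s _
  unfold Spec_solution solution solution_alt
  have harr := pvFold s.toList []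
  simp only [List.getLast?_nil, List.nil_append] at harr
  simp only [harr, pvLists]
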